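-- pv_equiv track=rewrite | github.com/Aparna1115/Google-FooBar | lovely_lucky_lambs/solution.py | generous
-- ===== SOURCE A (Python) =====
-- def generous(total_lambs):
--
--     genhenchmen = 1
--     prev = 0
--     lastguy = 1
--     total_lambs -= 1
--     while(total_lambs > 0):
--         if((total_lambs) < (2* lastguy)):
--             if(total_lambs >=(lastguy + prev)):
--                 genhenchmen = genhenchmen + 1
--             break
--         genhenchmen = genhenchmen + 1
--         prev = lastguy
--         lastguy = 2*(lastguy)
--
--         total_lambs = total_lambs - lastguy
--     return genhenchmen
-- ===== SOURCE B (Python) =====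
-- def generous(total_lambs):
--     # Closed form: minimum lambs for n henchmen is 7*2^(n-3)-1 for n>=3,
--     # so the answer is read off the bit length of (total_lambs+1)//7.
--     if total_lambs < 2:
--         return 1
--     if total_lambs < 6:
--         return 2
--     return ((total_lambs + 1) // 7).bit_length() + 2
-- ===== Notes on version B (the rewrite author's own statement) =====
-- stated objective: faster
-- what changed: Replaced the subtract-and-double loop with an O(1) closed form: the answer is ((total_lambs+1)//7).bit_length()+2 (with two small base cases), since the minimal lamb total for n henchmen is 7*2^(n-3)-1.
import Mathlib
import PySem

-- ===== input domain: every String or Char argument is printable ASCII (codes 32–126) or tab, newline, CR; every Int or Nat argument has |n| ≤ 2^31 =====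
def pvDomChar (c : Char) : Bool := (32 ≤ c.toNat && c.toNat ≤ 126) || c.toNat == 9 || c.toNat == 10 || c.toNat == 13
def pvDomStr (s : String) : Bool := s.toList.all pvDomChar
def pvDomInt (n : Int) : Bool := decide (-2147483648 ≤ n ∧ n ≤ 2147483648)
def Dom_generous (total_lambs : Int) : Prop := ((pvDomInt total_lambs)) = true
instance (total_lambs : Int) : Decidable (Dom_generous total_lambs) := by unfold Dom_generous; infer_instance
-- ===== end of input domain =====

-- B replaces A's subtract-and-double loop with an O(1) bit-length closed form; return values agree on all ints.

-- ===== PORT A =====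
-- the while loop of A, state (total_lambs, prev, lastguy, genhenchmen);
-- the hypothesis 1 ≤ lastguy only justifies termination (lastguy is 1,2,4,… in A).
def generousLoop (tl prev lastguy gen : Int) (hl : 1 ≤ lastguy) : Int :=
  if tl > 0 then
    if tl < 2 * lastguy then
      if tl ≥ lastguy + prev then gen + 1 else gen
    else
      generousLoop (tl - 2 * lastguy) lastguy (2 * lastguy) (gen + 1) (by omega)
  else gen
termination_by tl.toNat
decreasing_by omega

def generous (total_lambs : Int) : Int :=
  generousLoop (total_lambs - 1) 0 1 1 (by norm_num)

-- ===== PORT B =====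
def generous_alt (total_lambs : Int) : Int :=
  if total_lambs < 2 then 1
  else if total_lambs < 6 then 2
  else (PySem.Int.bitLength (PySem.Int.floordiv (total_lambs + 1) 7) : Int) + 2

-- ===== PRECONDITION & SPEC =====
def Spec_generous (total_lambs : Int) (out : Int) : Prop := out = generous_alt total_lambs
instance (total_lambs : Int) (out : Int) : Decidable (Spec_generous total_lambs out) := by unfold Spec_generous; infer_instance

-- ===== CLAIM (what is proved, stated in full; the proofs are below) =====
def Claim_equal_generous : Prop := ∀ (total_lambs : Int), Dom_generous total_lambs → Spec_generous total_lambs (generous total_lambs)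

-- ===== LEMMAS AND PROOFS =====

-- the loop's result shifts with the accumulator
theorem generousLoop_gen_add : ∀ (n : Nat) (tl prev lastguy gen : Int) (hl : 1 ≤ lastguy),
    tl.toNat ≤ n →
    generousLoop tl prev lastguy (gen + 1) hl = generousLoop tl prev lastguy gen hl + 1 := by
  intro n
  induction n with
  | zero =>
    intro tl prev lastguy gen hl hn
    conv_lhs => rw [generousLoop]
    conv_rhs => rw [generousLoop]
    split_ifs <;> omega
  | succ n ih =>
    intro tl prev lastguy gen hl hn
    conv_lhs => rw [generousLoop]
    conv_rhs => rw [generousLoop]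
    split_ifs with h1 h2 h3
    · ring
    · ring
    · exact ih (tl - 2 * lastguy) lastguy (2 * lastguy) (gen + 1) (by omega) (by omega)
    · rfl

-- halving the whole state halves the run (b is tl's parity bit, c prev's; c = 1 only allowed with b = 1)
theorem generousLoop_scale : ∀ (n : Nat) (s p l g b c : Int)
    (hl : 1 ≤ l) (hl2 : 1 ≤ 2 * l),
    (2 * s + b).toNat ≤ n → 0 ≤ p → 0 ≤ b → b ≤ 1 → 0 ≤ c → c ≤ 1 → (c = 0 ∨ b = 1) →
    generousLoop (2 * s + b) (2 * p + c) (2 * l) g hl2 = generousLoop s p l g hl := by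
  intro n
  induction n with
  | zero =>
    intro s p l g b c hl hl2 hn hp hb0 hb1 hc0 hc1 hbc
    conv_lhs => rw [generousLoop]
    conv_rhs => rw [generousLoop]
    split_ifs <;> omega
  | succ n ih =>
    intro s p l g b c hl hl2 hn hp hb0 hb1 hc0 hc1 hbc
    conv_lhs => rw [generousLoop]
    conv_rhs => rw [generousLoop]
    split_ifs <;> try omega
    -- the only surviving branch: both sides recurse
    all_goals (
      have e1 : 2 * s + b - 2 * (2 * l) = 2 * (s - 2 * l) + b := by ring
      rw [e1]
      have h := ih (s - 2 * l) l (2 * l) (g + 1) b 0 hl2 (by omega) (by omega) (by omega)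
        hb0 hb1 (by omega) (by omega) (Or.inl rfl)
      simpa using h)

-- A-side step: for t ≥ 13, one halving of the input costs exactly one henchman
theorem generous_step (t : Int) (ht : 13 ≤ t) :
    generous t = generous ((t - 1) / 2) + 1 := by
  have hleft : generous t = generousLoop ((t - 7) / 2) 1 2 3 (by norm_num) := by
    rw [generous]
    conv_lhs => rw [generousLoop]
    have h1 : t - 1 > 0 := by omega
    have h2 : ¬ (t - 1 < 2 * 1) := by omega
    rw [if_pos h1, if_neg h2]
    conv_lhs => rw [generousLoop]
    have h3 : t - 1 - 2 * 1 > 0 := by omega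
    have h4 : ¬ (t - 1 - 2 * 1 < 2 * (2 * 1)) := by omega
    rw [if_pos h3, if_neg h4]
    -- state is (t - 7, 2, 4, 3); halve it with the scale lemma
    have e1 : t - 1 - 2 * 1 - 2 * (2 * 1) = 2 * ((t - 7) / 2) + (t - 7) % 2 := by omega
    rw [e1]
    have h := generousLoop_scale (2 * ((t - 7) / 2) + (t - 7) % 2).toNat
      ((t - 7) / 2) 1 2 3 ((t - 7) % 2) 0 (by norm_num) (by norm_num) (le_refl _)
      (by omega) (by omega) (by omega) (by omega) (by omega) (Or.inl rfl)
    have e2 : (1 : Int) + 1 + 1 = 3 := by norm_num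
    rw [e2]
    simpa using h
  have hright : generous ((t - 1) / 2) = generousLoop ((t - 7) / 2) 1 2 2 (by norm_num) := by
    rw [generous]
    conv_lhs => rw [generousLoop]
    have h1 : (t - 1) / 2 - 1 > 0 := by omega
    have h2 : ¬ ((t - 1) / 2 - 1 < 2 * 1) := by omega
    rw [if_pos h1, if_neg h2]
    have e1 : (t - 1) / 2 - 1 - 2 * 1 = (t - 7) / 2 := by omega
    rw [e1]
    norm_num
  rw [hleft, hright]
  have h := generousLoop_gen_add ((t - 7) / 2).toNat ((t - 7) / 2) 1 2 2 (by norm_num) (le_refl _)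
  simpa using h

-- B-side step: the closed form satisfies the same recursion
theorem generous_alt_step (t : Int) (ht : 13 ≤ t) :
    generous_alt t = generous_alt ((t - 1) / 2) + 1 := by
  have h1 : ¬ (t < 2) := by omega
  have h2 : ¬ (t < 6) := by omega
  have h3 : ¬ ((t - 1) / 2 < 2) := by omega
  have h4 : ¬ ((t - 1) / 2 < 6) := by omega
  rw [generous_alt, generous_alt]
  rw [if_neg h1, if_neg h2, if_neg h3, if_neg h4]
  have hm' : PySem.Int.floordiv ((t - 1) / 2 + 1) 7 = ((t - 1) / 2 + 1) / 7 :=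
    PySem.Int.floordiv_eq_ediv_of_pos (by norm_num)
  rw [hm']
  have hhalf : ((t - 1) / 2 + 1) / 7 = PySem.Int.floordiv (PySem.Int.floordiv (t + 1) 7) 2 := by
    rw [PySem.Int.floordiv_eq_ediv_of_pos (show (0:Int) < 2 by norm_num),
      PySem.Int.floordiv_eq_ediv_of_pos (show (0:Int) < 7 by norm_num)]
    omega
  rw [hhalf]
  have hpos : 0 < PySem.Int.floordiv (t + 1) 7 := by
    rw [PySem.Int.floordiv_eq_ediv_of_pos (show (0:Int) < 7 by norm_num)]; omega
  rw [PySem.Int.bitLength_of_pos hpos]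
  push_cast
  ring

theorem generous_eq_alt : ∀ (t : Int), generous t = generous_alt t := by
  have main : ∀ (n : Nat) (t : Int), t.toNat ≤ n → generous t = generous_alt t := by
    intro n
    induction n with
    | zero =>
      intro t htn
      have h1 : ¬ (t - 1 > 0) := by omega
      have h2 : t < 2 := by omega
      rw [generous, generous_alt, if_pos h2]
      rw [generousLoop, if_neg h1]
    | succ n ih =>
      intro t htn
      by_cases hsmall : t ≤ 1
      · have h1 : ¬ (t - 1 > 0) := by omega
        have h2 : t < 2 := by omega
        rw [generous, generous_alt, if_pos h2]
        rw [generousLoop, if_neg h1]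
      · by_cases hmid : t ≤ 12
        · have h2 : 2 ≤ t := by omega
          interval_cases t <;>
            simp [generous, generousLoop, generous_alt, PySem.Int.floordiv,
              PySem.Int.bitLength] <;> decide
        · have ht : 13 ≤ t := by omega
          rw [generous_step t ht, generous_alt_step t ht, ih ((t - 1) / 2) (by omega)]
  intro t
  exact main t.toNat t (le_refl _)

-- ===== VERDICT (by name: the statement is the Claim_ definition above) =====
theorem generous_spec : Claim_equal_generous := by
  intro t _
  unfold Spec_generous
  exact generous_eq_alt t
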